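-- pv_equiv track=rewrite | github.com/wilmurillo-ai/Design-Assistant | .skills/openclaw-skills/skills/alirezarezvani/jira-expert/scripts/workflow_validator.py | check_circular_paths
-- ===== SOURCE A (Python) =====
-- from typing import Any, Dict, List, Optional, Set, Tuple
--
-- def check_circular_paths(
--     states: List[str],
--     transitions: List[Dict[str, str]],
--     terminal_states: Set[str],
-- ) -> List[Dict[str, str]]:
--     """Detect circular paths that have no exit to a terminal state."""
--     findings = []
--
--     # Build adjacency list
--     adjacency = {}
--     for state in states:
--         adjacency[state.lower()] = set()
--     for t in transitions:
--         from_state = t.get("from", "").lower()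
--         to_state = t.get("to", "").lower()
--         if from_state in adjacency:
--             adjacency[from_state].add(to_state)
--
--     # Find strongly connected components using iterative DFS
--     def can_reach_terminal(start: str) -> bool:
--         visited = set()
--         stack = [start]
--         while stack:
--             node = stack.pop()
--             if node in terminal_states:
--                 return True
--             if node in visited:
--                 continue
--             visited.add(node)
--             for neighbor in adjacency.get(node, set()):
--                 stack.append(neighbor)
--         return False
--
--     # Check each non-terminal state
--     for state in states:
--         state_lower = state.lower()
--         if state_lower not in terminal_states:
--             if not can_reach_terminal(state_lower):
--                 findings.append({
--                     "rule": "circular_no_exit",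
--                     "severity": "error",
--                     "message": f"State '{state}' cannot reach any terminal state. "
--                                f"Issues entering this state will never be resolved.",
--                 })
--
--     return findings
-- ===== SOURCE B (Python) =====
-- def check_circular_paths(states, transitions, terminal_states):
--     """Detect circular paths that have no exit to a terminal state.
--
--     Backward saturation: grow the set of nodes that can reach a
--     terminal state until a fixpoint, then report states outside it.
--     """
--     findings = []
--
--     # Build adjacency list (same shape as the original)
--     adjacency = {}
--     for state in states:
--         adjacency[state.lower()] = set()
--     for t in transitions:
--         from_state = t.get("from", "").lower()
--         to_state = t.get("to", "").lower()
--         if from_state in adjacency: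
--             adjacency[from_state].add(to_state)
--
--     # All graph nodes: every source state plus every transition target
--     nodes = list(adjacency)
--     for targets in adjacency.values():
--         nodes.extend(targets)
--
--     # Backward saturation: reach = nodes that can reach some terminal state
--     reach = set(n for n in nodes if n in terminal_states)
--     while True:
--         fresh = [u for u in nodes
--                  if u not in reach and not adjacency.get(u, set()).isdisjoint(reach)]
--         if not fresh:
--             break
--         reach.update(fresh)
--
--     for state in states:
--         state_lower = state.lower()
--         if state_lower not in terminal_states and state_lower not in reach:
--             findings.append({
--                 "rule": "circular_no_exit",
--                 "severity": "error",
--                 "message": f"State '{state}' cannot reach any terminal state. "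
--                            f"Issues entering this state will never be resolved.",
--             })
--     return findings
-- ===== Notes on version B (the rewrite author's own statement) =====
-- stated objective: alternative
-- what changed: A runs a fresh stack-based DFS from every non-terminal state to test terminal reachability; B computes the set of all states that can reach a terminal once, by backward saturation (repeatedly adding nodes with an edge into the reached set until a fixpoint), then does one pass over the states.
import Mathlib
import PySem

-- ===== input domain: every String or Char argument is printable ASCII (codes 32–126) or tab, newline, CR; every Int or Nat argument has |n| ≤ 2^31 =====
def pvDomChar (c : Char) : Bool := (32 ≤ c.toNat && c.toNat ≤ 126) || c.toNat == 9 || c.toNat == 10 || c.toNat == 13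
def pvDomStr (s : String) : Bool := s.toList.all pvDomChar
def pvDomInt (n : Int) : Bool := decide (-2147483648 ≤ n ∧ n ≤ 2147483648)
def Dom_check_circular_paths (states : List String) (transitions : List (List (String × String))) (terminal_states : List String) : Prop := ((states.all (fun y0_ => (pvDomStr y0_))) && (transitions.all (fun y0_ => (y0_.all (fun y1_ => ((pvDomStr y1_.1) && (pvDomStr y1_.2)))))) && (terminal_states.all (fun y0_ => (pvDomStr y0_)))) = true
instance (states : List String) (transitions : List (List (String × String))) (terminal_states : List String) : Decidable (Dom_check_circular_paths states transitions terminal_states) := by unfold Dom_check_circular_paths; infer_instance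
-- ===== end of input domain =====

-- B replaces A's per-state DFS (a fresh search for every state) by ONE global backward
-- saturation of the "can reach a terminal" set, then a single pass over the states.

-- helper lemmas the ports cite for termination / their proof arguments
theorem pv_filter_lt {l : List String} {p q : String → Bool}
    (hmono : ∀ x ∈ l, q x = true → p x = true) (u : String) (hu : u ∈ l)
    (hp : p u = true) (hq : q u = false) :
    (l.filter q).length < (l.filter p).length := by
  obtain ⟨s, t, rfl⟩ := List.append_of_mem hu
  have h1 : s.countP q ≤ s.countP p :=
    List.countP_mono_left (fun x hx => hmono x (by simp [hx]))
  have h2 : t.countP q ≤ t.countP p :=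
    List.countP_mono_left (fun x hx => hmono x (by simp [hx]))
  simp only [List.filter_append, List.filter_cons, hp, hq, Bool.false_eq_true,
    if_true, if_false, List.length_append, List.length_cons,
    ← List.countP_eq_length_filter] at *
  omega

theorem pv_mem_foldl_cons {α : Type} (l st : List α) (x : α) :
    x ∈ l.foldl (fun s a => a :: s) st ↔ x ∈ l ∨ x ∈ st := by
  induction l generalizing st with
  | nil => simp
  | cons a l ih => simp only [List.foldl_cons, ih, List.mem_cons]; tauto

theorem pv_getD_mem_values {κ : Type} [BEq κ] [LawfulBEq κ] (d : PySem.Dict κ (PySem.Set String))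
    (u : κ) (v : String) (hv : v ∈ d.getD u PySem.Set.empty) :
    v ∈ d.values.flatten := by
  cases h : d.get? u with
  | none =>
    rw [PySem.Dict.getD_of_get?_eq_none _ _ h] at hv
    simp [PySem.Set.empty] at hv
  | some s =>
    rw [PySem.Dict.getD_of_get?_eq_some _ _ h] at hv
    have : (u, s) ∈ d.items := PySem.Dict.mem_items_of_get?_eq_some _ h
    have hs : s ∈ d.values := by
      simp only [PySem.Dict.values]
      exact List.mem_map.mpr ⟨(u, s), this, rfl⟩
    exact List.mem_flatten.mpr ⟨s, hs, hv⟩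

-- ===== PORT A =====
def pvFinding (state : String) : List (String × String) :=
  [("rule", "circular_no_exit"), ("severity", "error"),
   ("message", "State '" ++ state ++ "' cannot reach any terminal state. Issues entering this state will never be resolved.")]

-- the adjacency-building loops (identical source lines in A and in B)
def pvAdj (states : List String) (transitions : List (List (String × String))) :
    PySem.Dict String (PySem.Set String) :=
  let d0 := states.foldl (fun d s => d.insert (PySem.Str.lower s) PySem.Set.empty) PySem.Dict.empty
  transitions.foldl (fun d t =>
    let td := PySem.Dict.ofList t
    let from_state := PySem.Str.lower (td.getD "from" "")
    let to_state := PySem.Str.lower (td.getD "to" "")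
    if d.contains from_state then
      d.modify from_state PySem.Set.empty (fun s => PySem.Set.add s to_state)
    else d) d0

-- A's 'while stack:' loop; 'univ' and the proof arguments only serve termination.
-- (Python iterates the neighbour SET in hash order onto the stack; the Boolean result
-- is independent of that order, here neighbours are pushed in list order.)
def pvDfs (adj : PySem.Dict String (PySem.Set String)) (T : List String) (univ : List String)
    (hadj : ∀ u v, v ∈ adj.getD u PySem.Set.empty → v ∈ univ)
    (visited : PySem.Set String) (stack : List String)
    (hs : ∀ n ∈ stack, n ∈ univ) : Bool :=
  match stack with
  | [] => false
  | node :: rest =>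
    if T.contains node then true
    else if PySem.Set.contains visited node then
      pvDfs adj T univ hadj visited rest (fun n hn => hs n (List.mem_cons_of_mem _ hn))
    else
      pvDfs adj T univ hadj (PySem.Set.add visited node)
        ((adj.getD node PySem.Set.empty).foldl (fun st nb => nb :: st) rest)
        (by
          intro n hn
          rcases (pv_mem_foldl_cons _ _ _).mp hn with h | h
          · exact hadj node n h
          · exact hs n (List.mem_cons_of_mem _ h))
  termination_by ((univ.filter (fun x => !PySem.Set.contains visited x)).length, stack.length)
  decreasing_by
  · exact Prod.Lex.right _ (by simp)
  · apply Prod.Lex.left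
    apply pv_filter_lt (u := node)
    · intro x _hx h
      simp only [Bool.not_eq_true'] at h ⊢
      cases hc : PySem.Set.contains visited x with
      | false => rfl
      | true =>
        have : x ∈ PySem.Set.add visited node :=
          (PySem.Set.mem_add _ _ _).mpr (Or.inl ((PySem.Set.contains_iff _ _).mp hc))
        rw [(PySem.Set.contains_iff _ _).mpr this] at h
        exact absurd h (by simp)
    · exact hs node List.mem_cons_self
    · simpa using (by assumption : ¬ PySem.Set.contains visited node = true)
    · simp

def pvCanReach (adj : PySem.Dict String (PySem.Set String)) (T : List String)
    (start : String) : Bool :=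
  pvDfs adj T (start :: adj.values.flatten)
    (fun u v hv => List.mem_cons_of_mem _ (pv_getD_mem_values adj u v hv))
    PySem.Set.empty [start] (by simp)

def check_circular_paths (states : List String) (transitions : List (List (String × String))) (terminal_states : List String) : List (List (String × String)) :=
  let adjacency := pvAdj states transitions
  states.foldl (fun findings state =>
    let state_lower := PySem.Str.lower state
    if terminal_states.contains state_lower then findings
    else if pvCanReach adjacency terminal_states state_lower then findings
    else findings ++ [pvFinding state]) []

-- ===== PORT B =====
-- B's 'while True:' saturation loop
def pvFresh (adj : PySem.Dict String (PySem.Set String)) (nodes : List String)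
    (reach : PySem.Set String) : List String :=
  nodes.filter (fun u =>
    !PySem.Set.contains reach u &&
    !PySem.Set.isdisjoint (adj.getD u PySem.Set.empty) reach)

def pvSat (adj : PySem.Dict String (PySem.Set String)) (nodes : List String)
    (reach : PySem.Set String) : PySem.Set String :=
  if _h : (pvFresh adj nodes reach).isEmpty then reach
  else pvSat adj nodes (PySem.Set.update reach (pvFresh adj nodes reach))
  termination_by (nodes.filter (fun u => !PySem.Set.contains reach u)).length
  decreasing_by
    have hne : pvFresh adj nodes reach ≠ [] := by simpa [List.isEmpty_iff] using _h
    obtain ⟨u, hu⟩ := List.exists_mem_of_ne_nil _ hne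
    have hu' := hu
    simp only [pvFresh, List.mem_filter, Bool.and_eq_true, Bool.not_eq_true'] at hu'
    apply pv_filter_lt (u := u)
    · intro x _hx hq
      simp only [Bool.not_eq_true'] at hq ⊢
      cases hc : PySem.Set.contains reach x with
      | false => rfl
      | true =>
        have hm : x ∈ PySem.Set.update reach (pvFresh adj nodes reach) :=
          (PySem.Set.mem_update _ _ _).mpr (Or.inl ((PySem.Set.contains_iff _ _).mp hc))
        rw [(PySem.Set.contains_iff _ _).mpr hm] at hq
        exact absurd hq (by simp)
    · exact hu'.1
    · simp only [hu'.2.1, Bool.not_false]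
    · have hc := (PySem.Set.contains_iff (PySem.Set.update reach (pvFresh adj nodes reach)) u).mpr
        ((PySem.Set.mem_update reach (pvFresh adj nodes reach) u).mpr (Or.inr hu))
      show (!PySem.Set.contains (PySem.Set.update reach (pvFresh adj nodes reach)) u) = false
      rw [hc]
      rfl

def check_circular_paths_alt (states : List String) (transitions : List (List (String × String))) (terminal_states : List String) : List (List (String × String)) :=
  let adjacency := pvAdj states transitions
  let nodes := adjacency.keys ++ adjacency.values.flatten
  let reach := pvSat adjacency nodes
    (PySem.Set.ofList (nodes.filter (fun n => terminal_states.contains n)))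
  states.foldl (fun findings state =>
    let state_lower := PySem.Str.lower state
    if terminal_states.contains state_lower then findings
    else if PySem.Set.contains reach state_lower then findings
    else findings ++ [pvFinding state]) []

-- ===== PRECONDITION & SPEC =====
def Spec_check_circular_paths (states : List String) (transitions : List (List (String × String))) (terminal_states : List String) (out : List (List (String × String))) : Prop := out = check_circular_paths_alt states transitions terminal_states
instance (states : List String) (transitions : List (List (String × String))) (terminal_states : List String) (out : List (List (String × String))) : Decidable (Spec_check_circular_paths states transitions terminal_states out) := by unfold Spec_check_circular_paths; infer_instance

-- ===== CLAIM (what is proved, stated in full; the proofs are below) =====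
def Claim_equal_check_circular_paths : Prop := ∀ (states : List String) (transitions : List (List (String × String))) (terminal_states : List String), Dom_check_circular_paths states transitions terminal_states → Spec_check_circular_paths states transitions terminal_states (check_circular_paths states transitions terminal_states)

-- ===== LEMMAS AND PROOFS =====
def pvEdge (adj : PySem.Dict String (PySem.Set String)) (u v : String) : Prop :=
  v ∈ adj.getD u PySem.Set.empty

def pvReach (adj : PySem.Dict String (PySem.Set String)) (T : List String) (u : String) : Prop :=
  ∃ t, Relation.ReflTransGen (pvEdge adj) u t ∧ t ∈ T

theorem pv_rtg_stay (adj : PySem.Dict String (PySem.Set String)) (V : List String)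
    (hcl : ∀ x ∈ V, ∀ v, pvEdge adj x v → v ∈ V) {u t : String}
    (h : Relation.ReflTransGen (pvEdge adj) u t) (hu : u ∈ V) : t ∈ V := by
  induction h with
  | refl => exact hu
  | tail _ he ih => exact hcl _ ih _ he

theorem pvDfs_false (adj : PySem.Dict String (PySem.Set String)) (T : List String)
    (univ : List String) (hadj : ∀ u v, v ∈ adj.getD u PySem.Set.empty → v ∈ univ)
    (visited : PySem.Set String) (stack : List String) (hs : ∀ n ∈ stack, n ∈ univ)
    (hvT : ∀ x ∈ visited, x ∉ T)
    (hvc : ∀ x ∈ visited, ∀ v, pvEdge adj x v → v ∈ visited ∨ v ∈ stack)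
    (hres : pvDfs adj T univ hadj visited stack hs = false) :
    ∀ n, n ∈ stack ∨ n ∈ visited → ¬ pvReach adj T n := by
  revert hvT hvc hres
  induction visited, stack, hs using pvDfs.induct adj T univ hadj with
  | case1 visited hs _ =>
    intro hvT hvc _ n hn
    rcases hn with hn | hn
    · simp at hn
    · rintro ⟨t, hrtg, htT⟩
      have hcl : ∀ x ∈ visited, ∀ v, pvEdge adj x v → v ∈ visited := by
        intro x hx v he
        rcases hvc x hx v he with h | h
        · exact h
        · simp at h
      exact hvT t (pv_rtg_stay adj visited hcl hrtg hn) htT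
  | case2 visited node rest hs hT _ =>
    intro _ _ hres
    rw [pvDfs, if_pos hT] at hres
    simp at hres
  | case3 visited node rest hs hT hvis _ ih =>
    intro hvT hvc hres
    rw [pvDfs] at hres
    simp only [hT, hvis, if_false, Bool.false_eq_true] at hres
    have hnode : node ∈ visited := (PySem.Set.contains_iff _ _).mp hvis
    have hvc' : ∀ x ∈ visited, ∀ v, pvEdge adj x v → v ∈ visited ∨ v ∈ rest := by
      intro x hx v he
      rcases hvc x hx v he with h | h
      · exact Or.inl h
      · rcases List.mem_cons.mp h with rfl | h
        · exact Or.inl hnode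
        · exact Or.inr h
    intro n hn
    rcases hn with hn | hn
    · rcases List.mem_cons.mp hn with rfl | hn
      · exact ih hvT hvc' hres n (Or.inr hnode)
      · exact ih hvT hvc' hres n (Or.inl hn)
    · exact ih hvT hvc' hres n (Or.inr hn)
  | case4 visited node rest hs hT hvis _ ih =>
    intro hvT hvc hres
    rw [pvDfs] at hres
    simp only [hT, hvis, if_false, Bool.false_eq_true] at hres
    have hnT : node ∉ T := fun hm => hT (List.contains_iff_mem.mpr hm)
    have hmemadd : node ∈ PySem.Set.add visited node :=
      (PySem.Set.mem_add _ _ _).mpr (Or.inr rfl)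
    have hvT' : ∀ x ∈ PySem.Set.add visited node, x ∉ T := by
      intro x hx
      rcases (PySem.Set.mem_add _ _ _).mp hx with hx | rfl
      · exact hvT x hx
      · exact hnT
    have hvc' : ∀ x ∈ PySem.Set.add visited node, ∀ v, pvEdge adj x v →
        v ∈ PySem.Set.add visited node ∨
        v ∈ List.foldl (fun st nb => nb :: st) rest (adj.getD node PySem.Set.empty) := by
      intro x hx v he
      rcases (PySem.Set.mem_add _ _ _).mp hx with hx | rfl
      · rcases hvc x hx v he with h | h
        · exact Or.inl ((PySem.Set.mem_add _ _ _).mpr (Or.inl h))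
        · rcases List.mem_cons.mp h with rfl | h
          · exact Or.inl hmemadd
          · exact Or.inr ((pv_mem_foldl_cons _ _ _).mpr (Or.inr h))
      · exact Or.inr ((pv_mem_foldl_cons _ _ _).mpr (Or.inl he))
    intro n hn
    rcases hn with hn | hn
    · rcases List.mem_cons.mp hn with rfl | hn
      · exact ih hvT' hvc' hres n (Or.inr hmemadd)
      · exact ih hvT' hvc' hres n (Or.inl ((pv_mem_foldl_cons _ _ _).mpr (Or.inr hn)))
    · exact ih hvT' hvc' hres n (Or.inr ((PySem.Set.mem_add _ _ _).mpr (Or.inl hn)))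

theorem pvDfs_true (adj : PySem.Dict String (PySem.Set String)) (T : List String)
    (univ : List String) (hadj : ∀ u v, v ∈ adj.getD u PySem.Set.empty → v ∈ univ)
    (visited : PySem.Set String) (stack : List String) (hs : ∀ n ∈ stack, n ∈ univ)
    (start : String)
    (hst : ∀ n ∈ stack, Relation.ReflTransGen (pvEdge adj) start n)
    (hres : pvDfs adj T univ hadj visited stack hs = true) :
    pvReach adj T start := by
  revert hst hres
  induction visited, stack, hs using pvDfs.induct adj T univ hadj with
  | case1 visited hs _ =>
    intro _ hres
    rw [pvDfs] at hres
    simp at hres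
  | case2 visited node rest hs hT _ =>
    intro hst _
    exact ⟨node, hst node List.mem_cons_self, List.contains_iff_mem.mp hT⟩
  | case3 visited node rest hs hT hvis _ ih =>
    intro hst hres
    rw [pvDfs] at hres
    simp only [hT, hvis, if_false, Bool.false_eq_true] at hres
    exact ih (fun n hn => hst n (List.mem_cons_of_mem _ hn)) hres
  | case4 visited node rest hs hT hvis _ ih =>
    intro hst hres
    rw [pvDfs] at hres
    simp only [hT, hvis, if_false, Bool.false_eq_true] at hres
    apply ih _ hres
    intro n hn
    rcases (pv_mem_foldl_cons _ _ _).mp hn with hn | hn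
    · exact (hst node List.mem_cons_self).tail hn
    · exact hst n (List.mem_cons_of_mem _ hn)

theorem pvCanReach_iff (adj : PySem.Dict String (PySem.Set String)) (T : List String)
    (s : String) : pvCanReach adj T s = true ↔ pvReach adj T s := by
  constructor
  · intro h
    exact pvDfs_true adj T _ _ _ _ _ s
      (fun n hn => by rcases List.mem_cons.mp hn with rfl | hn
                      · exact Relation.ReflTransGen.refl
                      · simp at hn) h
  · intro hr
    cases hb : pvCanReach adj T s with
    | true => rfl
    | false =>
      rw [pvCanReach] at hb
      exact absurd hr
        (pvDfs_false adj T _ _ _ _ _ (by intro x hx; simp [PySem.Set.empty] at hx)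
          (by intro x hx; simp [PySem.Set.empty] at hx) hb s
          (Or.inl List.mem_cons_self))

theorem pvSat_subset (adj : PySem.Dict String (PySem.Set String)) (nodes : List String)
    (reach : PySem.Set String) : ∀ x ∈ reach, x ∈ pvSat adj nodes reach := by
  induction reach using pvSat.induct adj nodes with
  | case1 reach hE =>
    intro x hx
    rw [pvSat, dif_pos hE]
    exact hx
  | case2 reach hE ih =>
    intro x hx
    rw [pvSat, dif_neg hE]
    exact ih x ((PySem.Set.mem_update _ _ _).mpr (Or.inl hx))

theorem pvSat_closed (adj : PySem.Dict String (PySem.Set String)) (nodes : List String)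
    (reach : PySem.Set String) :
    ∀ u ∈ nodes, (∃ v, pvEdge adj u v ∧ v ∈ pvSat adj nodes reach) →
      u ∈ pvSat adj nodes reach := by
  induction reach using pvSat.induct adj nodes with
  | case1 reach hE =>
    intro u hu hv
    rw [pvSat, dif_pos hE] at hv ⊢
    obtain ⟨v, he, hvr⟩ := hv
    simp only [pvFresh, List.isEmpty_iff, List.filter_eq_nil_iff] at hE
    have := hE u hu
    cases hc : PySem.Set.contains reach u with
    | true => exact (PySem.Set.contains_iff _ _).mp hc
    | false =>
      cases hd : PySem.Set.isdisjoint (adj.getD u PySem.Set.empty) reach with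
      | true => exact absurd hvr ((PySem.Set.isdisjoint_iff _ _).mp hd v he)
      | false => exact absurd (by rw [hc, hd]; rfl) this
  | case2 reach hE ih =>
    intro u hu hv
    rw [pvSat, dif_neg hE] at hv ⊢
    exact ih u hu hv

theorem pvSat_sound (adj : PySem.Dict String (PySem.Set String)) (T : List String)
    (nodes : List String) (reach : PySem.Set String)
    (hr : ∀ x ∈ reach, pvReach adj T x) :
    ∀ x ∈ pvSat adj nodes reach, pvReach adj T x := by
  revert hr
  induction reach using pvSat.induct adj nodes with
  | case1 reach hE =>
    intro hr x hx
    rw [pvSat, dif_pos hE] at hx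
    exact hr x hx
  | case2 reach hE ih =>
    intro hr x hx
    rw [pvSat, dif_neg hE] at hx
    refine ih ?_ x hx
    intro y hy
    rcases (PySem.Set.mem_update _ _ _).mp hy with hy | hy
    · exact hr y hy
    · simp only [pvFresh, List.mem_filter, Bool.and_eq_true, Bool.not_eq_true'] at hy
      obtain ⟨_, _, hdis⟩ := hy
      have hnd : ¬ (PySem.Set.isdisjoint (adj.getD y PySem.Set.empty) reach = true) := by
        rw [hdis]; simp
      rw [PySem.Set.isdisjoint_iff] at hnd
      push Not at hnd
      obtain ⟨v, hv, hvr⟩ := hnd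
      obtain ⟨t, hrtg, htT⟩ := hr v hvr
      exact ⟨t, Relation.ReflTransGen.head hv hrtg, htT⟩

theorem pvSat_complete (adj : PySem.Dict String (PySem.Set String)) (T : List String)
    (hnodes_cl : ∀ u v, pvEdge adj u v → v ∈ adj.keys ++ adj.values.flatten)
    (u : String) (hu : u ∈ adj.keys ++ adj.values.flatten)
    (hreach : pvReach adj T u) :
    u ∈ pvSat adj (adj.keys ++ adj.values.flatten)
      (PySem.Set.ofList ((adj.keys ++ adj.values.flatten).filter (fun n => T.contains n))) := by
  obtain ⟨t, hrtg, htT⟩ := hreach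
  revert hu
  induction hrtg using Relation.ReflTransGen.head_induction_on with
  | refl =>
    intro hu
    apply pvSat_subset
    rw [PySem.Set.mem_ofList]
    exact List.mem_filter.mpr ⟨hu, List.contains_iff_mem.mpr htT⟩
  | head he hrtg ih =>
    intro hu
    exact pvSat_closed _ _ _ _ hu ⟨_, he, ih (hnodes_cl _ _ he)⟩

theorem pv_keys_fold2 (transitions : List (List (String × String)))
    (d : PySem.Dict String (PySem.Set String)) :
    (transitions.foldl (fun d t =>
      let td := PySem.Dict.ofList t
      let from_state := PySem.Str.lower (td.getD "from" "")
      let to_state := PySem.Str.lower (td.getD "to" "")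
      if d.contains from_state then
        d.modify from_state PySem.Set.empty (fun s => PySem.Set.add s to_state)
      else d) d).keys = d.keys := by
  induction transitions generalizing d with
  | nil => rfl
  | cons t ts ih =>
    rw [List.foldl_cons, ih]
    dsimp only
    split
    · next hc =>
      rw [PySem.Dict.keys_modify, PySem.Dict.keys_insert_of_contains _ _ hc]
    · rfl

theorem pv_keys_pvAdj (states : List String) (transitions : List (List (String × String))) :
    (pvAdj states transitions).keys = PySem.Set.ofList (states.map PySem.Str.lower) := by
  unfold pvAdj
  rw [pv_keys_fold2]
  rw [PySem.Dict.keys_foldl_insert_key states PySem.Str.lower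
    (fun _ _ => PySem.Set.empty) PySem.Dict.empty]
  rw [PySem.Dict.keys_empty, PySem.Set.update_nil_left]

theorem pv_cond_eq (states : List String) (transitions : List (List (String × String)))
    (T : List String) (state : String) (hst : state ∈ states) :
    pvCanReach (pvAdj states transitions) T (PySem.Str.lower state)
      = PySem.Set.contains
          (pvSat (pvAdj states transitions)
            ((pvAdj states transitions).keys ++ (pvAdj states transitions).values.flatten)
            (PySem.Set.ofList (((pvAdj states transitions).keys ++
              (pvAdj states transitions).values.flatten).filter (fun n => T.contains n))))
          (PySem.Str.lower state) := by
  set adj := pvAdj states transitions with hadjdef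
  set nodes := adj.keys ++ adj.values.flatten with hnodesdef
  set R := pvSat adj nodes (PySem.Set.ofList (nodes.filter (fun n => T.contains n))) with hRdef
  have hmemR : (PySem.Str.lower state ∈ R) ↔ pvReach adj T (PySem.Str.lower state) := by
    constructor
    · intro h
      refine pvSat_sound adj T nodes _ ?_ _ h
      intro x hx
      rw [PySem.Set.mem_ofList] at hx
      exact ⟨x, Relation.ReflTransGen.refl, List.contains_iff_mem.mp (List.mem_filter.mp hx).2⟩
    · intro h
      apply pvSat_complete adj T
      · intro u v he
        exact List.mem_append.mpr (Or.inr (pv_getD_mem_values adj u v he))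
      · refine List.mem_append.mpr (Or.inl ?_)
        rw [hadjdef, pv_keys_pvAdj, PySem.Set.mem_ofList]
        exact List.mem_map.mpr ⟨state, hst, rfl⟩
      · exact h
  rw [Bool.eq_iff_iff, pvCanReach_iff, PySem.Set.contains_iff, hmemR]

-- ===== VERDICT (by name: the statement is the Claim_ definition above) =====
theorem check_circular_paths_spec : Claim_equal_check_circular_paths := by
  intro states transitions terminal_states _
  unfold Spec_check_circular_paths
  simp only [check_circular_paths, check_circular_paths_alt]
  apply PySem.List.foldl_congr_mem
  intro acc state hstate
  dsimp only
  rw [pv_cond_eq states transitions terminal_states state hstate]
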